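-- pv_equiv track=rewrite | github.com/kamasamikon/libhilda | tools/cfile_checker.py | calc_line_width
-- ===== SOURCE A (Python) =====
-- def calc_line_width(line, tabstop):
--     width = 0
--
--     for c in line:
--         if c == '\t':
--             width += tabstop
--             width -= width % tabstop
--         else:
--             width += 1
--
--     return width
-- ===== SOURCE B (Python) =====
-- def calc_line_width(line, tabstop):
--     parts = line.split('\t')
--     width = len(parts[0])
--     for seg in parts[1:]:
--         width += tabstop
--         width -= width % tabstop
--         width += len(seg)
--     return width
-- ===== Notes on version B (the rewrite author's own statement) =====
-- stated objective: alternative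
-- what changed: B splits the line on tabs once and processes whole segments (adding each segment's length, with one tab-rounding step per boundary) instead of A's character-by-character loop with a branch per character.
import Mathlib
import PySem

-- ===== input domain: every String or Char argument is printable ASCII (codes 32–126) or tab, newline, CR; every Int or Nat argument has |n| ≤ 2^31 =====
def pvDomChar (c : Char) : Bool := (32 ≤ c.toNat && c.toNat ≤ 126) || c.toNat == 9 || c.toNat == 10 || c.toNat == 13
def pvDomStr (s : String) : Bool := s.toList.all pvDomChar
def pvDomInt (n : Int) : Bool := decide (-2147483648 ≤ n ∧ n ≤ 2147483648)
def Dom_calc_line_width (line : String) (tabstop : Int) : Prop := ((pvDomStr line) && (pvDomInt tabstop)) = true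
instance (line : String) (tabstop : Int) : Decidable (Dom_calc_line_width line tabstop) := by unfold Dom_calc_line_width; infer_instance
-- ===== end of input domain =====

-- B computes the same width segment-by-segment over line.split('\t') instead of character-by-character (alternative decomposition, same cost).

-- ===== PORT A =====
def calc_line_width (line : String) (tabstop : Int) : Int :=
  line.toList.foldl (fun width c =>
    if c = '\t' then
      let width := width + tabstop
      width - PySem.Int.mod width tabstop
    else
      width + 1) 0

-- ===== PORT B =====
def calc_line_width_alt (line : String) (tabstop : Int) : Int :=
  match PySem.Chars.splitOn line.toList ['\t'] with
  | [] => 0   -- unreachable: split never returns an empty list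
  | p :: ps =>
    ps.foldl (fun width seg =>
      ((width + tabstop) - PySem.Int.mod (width + tabstop) tabstop) + (seg.length : Int))
      ((p.length : Int))

-- ===== PRECONDITION & SPEC =====
-- Pre_ excludes exactly the inputs where Python A raises ZeroDivisionError: tabstop = 0 with a tab in the line.
def Pre_calc_line_width (line : String) (tabstop : Int) : Prop :=
  tabstop = 0 → '\t' ∉ line.toList
instance (line : String) (tabstop : Int) : Decidable (Pre_calc_line_width line tabstop) := by unfold Pre_calc_line_width; infer_instance
def pvWitness_calc_line_width : String × Int := ("a\tbc", 4)

def Spec_calc_line_width (line : String) (tabstop : Int) (out : Int) : Prop := out = calc_line_width_alt line tabstop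
instance (line : String) (tabstop : Int) (out : Int) : Decidable (Spec_calc_line_width line tabstop out) := by unfold Spec_calc_line_width; infer_instance

-- ===== CLAIM (what is proved, stated in full; the proofs are below) =====
def Claim_equal_calc_line_width : Prop := ∀ (line : String) (tabstop : Int), Dom_calc_line_width line tabstop → Pre_calc_line_width line tabstop → Spec_calc_line_width line tabstop (calc_line_width line tabstop)

-- ===== LEMMAS AND PROOFS =====

/-- Simple structural characterisation of splitting on a single tab. -/
def tsplit : List Char → List (List Char)
  | [] => [[]]
  | c :: rest => if c = '\t' then [] :: tsplit rest else (tsplit rest).modifyHead (c :: ·)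

theorem tsplit_ne_nil (l : List Char) : tsplit l ≠ [] := by
  induction l with
  | nil => simp [tsplit]
  | cons c rest ih =>
    simp only [tsplit]
    split_ifs
    · simp
    · cases h : tsplit rest with
      | nil => exact absurd h ih
      | cons p ps => simp [List.modifyHead]

theorem splitOn_go_eq (fuel : Nat) :
    ∀ (l cur : List Char) (accs : List (List Char)), l.length ≤ fuel →
    PySem.Chars.splitOn.go ['\t'] fuel l cur accs.reverse =
      accs ++ (tsplit l).modifyHead (cur.reverse ++ ·) := by
  induction fuel with
  | zero =>
    intro l cur accs h
    have hl : l = [] := by cases l <;> simp_all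
    subst hl
    simp [PySem.Chars.splitOn.go, tsplit]
  | succ n ih =>
    intro l cur accs h
    cases l with
    | nil => simp [PySem.Chars.splitOn.go, tsplit]
    | cons c rest =>
      by_cases hc : c = '\t'
      · subst hc
        have : PySem.Chars.splitOn.go ['\t'] (n + 1) ('\t' :: rest) cur accs.reverse =
            PySem.Chars.splitOn.go ['\t'] n rest [] (cur.reverse :: accs.reverse) := by
          simp [PySem.Chars.splitOn.go, List.isPrefixOf]
        rw [this]
        have h2 : (cur.reverse :: accs.reverse) = (accs ++ [cur.reverse]).reverse := by simp
        rw [h2, ih rest [] (accs ++ [cur.reverse]) (by simpa using Nat.le_of_succ_le_succ h)]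
        rcases h3 : tsplit rest with _ | ⟨p, ps⟩
        · exact absurd h3 (tsplit_ne_nil rest)
        · simp [tsplit, h3]
      · have : PySem.Chars.splitOn.go ['\t'] (n + 1) (c :: rest) cur accs.reverse =
            PySem.Chars.splitOn.go ['\t'] n rest (c :: cur) accs.reverse := by
          simp [PySem.Chars.splitOn.go, List.isPrefixOf, Ne.symm hc]
        rw [this, ih rest (c :: cur) accs (by simpa using Nat.le_of_succ_le_succ h)]
        rcases h3 : tsplit rest with _ | ⟨p, ps⟩
        · exact absurd h3 (tsplit_ne_nil rest)
        · simp [tsplit, hc, h3]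

theorem splitOn_eq_tsplit (l : List Char) :
    PySem.Chars.splitOn l ['\t'] = tsplit l := by
  have h := splitOn_go_eq (l.length + 1) l [] [] (by omega)
  simp only [List.reverse_nil, List.nil_append, List.reverse_nil] at h
  rcases h3 : tsplit l with _ | ⟨p, ps⟩
  · exact absurd h3 (tsplit_ne_nil l)
  · simpa [PySem.Chars.splitOn, h3] using h

/-- Character fold equals segment fold over tsplit, for any accumulator. -/
theorem fold_eq_segfold (tabstop : Int) :
    ∀ (l : List Char) (w : Int),
    l.foldl (fun width c =>
      if c = '\t' then
        (width + tabstop) - PySem.Int.mod (width + tabstop) tabstop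
      else width + 1) w =
    (match tsplit l with
     | [] => w
     | p :: ps =>
       ps.foldl (fun width seg =>
         ((width + tabstop) - PySem.Int.mod (width + tabstop) tabstop) + (seg.length : Int))
         (w + (p.length : Int))) := by
  intro l
  induction l with
  | nil => intro w; simp [tsplit]
  | cons c rest ih =>
    intro w
    by_cases hc : c = '\t'
    · subst hc
      simp only [List.foldl_cons, if_pos]
      rw [ih]
      rcases h3 : tsplit rest with _ | ⟨p, ps⟩
      · exact absurd h3 (tsplit_ne_nil rest)
      · simp [tsplit, h3]
    · simp only [List.foldl_cons, if_neg hc]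
      rw [ih]
      rcases h3 : tsplit rest with _ | ⟨p, ps⟩
      · exact absurd h3 (tsplit_ne_nil rest)
      · simp only [tsplit, if_neg hc, h3, List.modifyHead]
        have : w + 1 + (p.length : Int) = w + ((c :: p).length : Int) := by
          simp; ring
        rw [this]

-- ===== VERDICT (by name: the statement is the Claim_ definition above) =====
theorem calc_line_width_spec : Claim_equal_calc_line_width := by
  intro line tabstop _ _
  unfold Spec_calc_line_width calc_line_width calc_line_width_alt
  rw [splitOn_eq_tsplit, fold_eq_segfold tabstop line.toList 0]
  rcases h3 : tsplit line.toList with _ | ⟨p, ps⟩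
  · exact absurd h3 (tsplit_ne_nil line.toList)
  · simp
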